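-- pv_equiv track=rewrite | github.com/adhamkhater/Divide_Conquer_algorithm | Bounus.py | combination_fn
-- ===== SOURCE A (Python) =====
-- def empty_mat_creation(size):
--     return [[None] * size for i in range(size)]
--
-- def combination_fn(top_left_new, top_right_new, bot_left_new, bot_right_new):
--     size = len(top_left_new)
--     c = empty_mat_creation(len(top_left_new) * 2)
--     for i in range(size):
--         for j in range(size):
--             c[i][j] = top_left_new[i][j]
--             c[i][j + size] = top_right_new[i][j]
--             c[i + size][j] = bot_left_new[i][j]
--             c[i + size][j + size] = bot_right_new[i][j]
--
--     return c
-- ===== SOURCE B (Python) =====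
-- def combination_fn(top_left_new, top_right_new, bot_left_new, bot_right_new):
--     n = len(top_left_new)
--     return [top_left_new[i][:n] + top_right_new[i][:n] for i in range(n)] + \
--            [bot_left_new[i][:n] + bot_right_new[i][:n] for i in range(n)]
-- ===== Notes on version B (the rewrite author's own statement) =====
-- stated objective: simpler
-- what changed: B builds each output row directly by concatenating the first n entries of the two corresponding quadrant rows and stacks the two halves, instead of allocating a None-filled 2n x 2n matrix and writing four cells per index pair in nested loops.
import Mathlib
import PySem

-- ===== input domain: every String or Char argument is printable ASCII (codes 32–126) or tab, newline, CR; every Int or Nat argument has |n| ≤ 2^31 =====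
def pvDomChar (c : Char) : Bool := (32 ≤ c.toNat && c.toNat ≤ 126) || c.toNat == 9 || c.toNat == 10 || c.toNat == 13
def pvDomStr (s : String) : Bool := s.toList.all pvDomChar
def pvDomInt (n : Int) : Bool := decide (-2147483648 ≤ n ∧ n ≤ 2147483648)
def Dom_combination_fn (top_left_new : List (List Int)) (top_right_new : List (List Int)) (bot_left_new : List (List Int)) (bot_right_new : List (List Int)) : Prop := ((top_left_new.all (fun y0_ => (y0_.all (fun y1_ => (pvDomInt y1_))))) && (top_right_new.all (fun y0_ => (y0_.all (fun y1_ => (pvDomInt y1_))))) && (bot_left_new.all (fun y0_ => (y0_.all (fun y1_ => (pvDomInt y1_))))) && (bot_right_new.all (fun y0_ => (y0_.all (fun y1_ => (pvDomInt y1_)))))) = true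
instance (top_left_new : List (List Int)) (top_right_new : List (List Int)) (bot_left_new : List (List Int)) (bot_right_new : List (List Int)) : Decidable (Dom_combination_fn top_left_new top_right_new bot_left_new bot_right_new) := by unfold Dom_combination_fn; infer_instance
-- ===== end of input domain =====

-- B glues each quadrant row pair by concatenation and stacks the halves instead of writing four
-- cells at a time into a pre-allocated None matrix (objective: simpler). Return value only; A mutates
-- nothing observable.

-- ===== PORT A =====
-- Python: [[None] * size for i in range(size)]  (None placeholders; they are all overwritten
-- before return on every input Pre_ admits, so the final `Option.getD 0` extraction is exact there)
def empty_mat_creation (size : Nat) : List (List (Option Int)) :=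
  List.replicate size (List.replicate size (none : Option Int))

-- Python: c[i][j] = v  (out-of-range set is excluded by Pre_; List.set is then exact)
def writeCell (c : List (List (Option Int))) (i j : Nat) (v : Int) : List (List (Option Int)) :=
  c.set i ((c.getD i []).set j (some v))

-- the body of the inner `for j in range(size)` loop, four writes in Python's order;
-- top_left_new[i][j] is read with getD: exact under Pre_ (indices are then in range;
-- Python raises IndexError outside Pre_)
def innerStep (top_left_new top_right_new bot_left_new bot_right_new : List (List Int))
    (size i : Nat) (c : List (List (Option Int))) (j : Nat) : List (List (Option Int)) :=
  let c := writeCell c i j (((top_left_new.getD i []).getD j 0))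
  let c := writeCell c i (j + size) (((top_right_new.getD i []).getD j 0))
  let c := writeCell c (i + size) j (((bot_left_new.getD i []).getD j 0))
  writeCell c (i + size) (j + size) (((bot_right_new.getD i []).getD j 0))

def outerStep (top_left_new top_right_new bot_left_new bot_right_new : List (List Int))
    (size : Nat) (c : List (List (Option Int))) (i : Nat) : List (List (Option Int)) :=
  (List.range size).foldl (innerStep top_left_new top_right_new bot_left_new bot_right_new size i) c

def combination_fn (top_left_new : List (List Int)) (top_right_new : List (List Int)) (bot_left_new : List (List Int)) (bot_right_new : List (List Int)) : List (List Int) :=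
  let size := top_left_new.length
  let c := empty_mat_creation (top_left_new.length * 2)
  let c := (List.range size).foldl (outerStep top_left_new top_right_new bot_left_new bot_right_new size) c
  c.map (fun row => row.map (fun x => x.getD 0))

-- ===== PORT B =====
-- bot_left_new[i] etc. is read with getD: exact under Pre_ (Python raises IndexError outside Pre_)
def combination_fn_alt (top_left_new : List (List Int)) (top_right_new : List (List Int)) (bot_left_new : List (List Int)) (bot_right_new : List (List Int)) : List (List Int) :=
  let n := top_left_new.length
  ((List.range n).map (fun i => (top_left_new.getD i []).take n ++ (top_right_new.getD i []).take n)) ++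
  ((List.range n).map (fun i => (bot_left_new.getD i []).take n ++ (bot_right_new.getD i []).take n))

-- ===== PRECONDITION & SPEC =====
-- Pre_ admits exactly the inputs on which the Python A returns normally: with n = len(top_left_new),
-- every quadrant has at least n rows and each of the first n rows of every quadrant has at least n
-- entries; outside Pre_ A raises IndexError.
def Pre_combination_fn (top_left_new : List (List Int)) (top_right_new : List (List Int)) (bot_left_new : List (List Int)) (bot_right_new : List (List Int)) : Prop :=
  top_left_new.length ≤ top_right_new.length ∧
  top_left_new.length ≤ bot_left_new.length ∧
  top_left_new.length ≤ bot_right_new.length ∧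
  (∀ r ∈ top_left_new, top_left_new.length ≤ r.length) ∧
  (∀ r ∈ top_right_new.take top_left_new.length, top_left_new.length ≤ r.length) ∧
  (∀ r ∈ bot_left_new.take top_left_new.length, top_left_new.length ≤ r.length) ∧
  (∀ r ∈ bot_right_new.take top_left_new.length, top_left_new.length ≤ r.length)
instance (top_left_new : List (List Int)) (top_right_new : List (List Int)) (bot_left_new : List (List Int)) (bot_right_new : List (List Int)) : Decidable (Pre_combination_fn top_left_new top_right_new bot_left_new bot_right_new) := by unfold Pre_combination_fn; infer_instance

def pvWitness_combination_fn : List (List Int) × List (List Int) × List (List Int) × List (List Int) :=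
  ([[1, 2], [3, 4]], [[5, 6], [7, 8]], [[9, 10], [11, 12]], [[13, 14], [15, 16]])

def Spec_combination_fn (top_left_new : List (List Int)) (top_right_new : List (List Int)) (bot_left_new : List (List Int)) (bot_right_new : List (List Int)) (out : List (List Int)) : Prop := out = combination_fn_alt top_left_new top_right_new bot_left_new bot_right_new
instance (top_left_new : List (List Int)) (top_right_new : List (List Int)) (bot_left_new : List (List Int)) (bot_right_new : List (List Int)) (out : List (List Int)) : Decidable (Spec_combination_fn top_left_new top_right_new bot_left_new bot_right_new out) := by unfold Spec_combination_fn; infer_instance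

-- ===== CLAIM (what is proved, stated in full; the proofs are below) =====
def Claim_equal_combination_fn : Prop := ∀ (top_left_new : List (List Int)) (top_right_new : List (List Int)) (bot_left_new : List (List Int)) (bot_right_new : List (List Int)), Dom_combination_fn top_left_new top_right_new bot_left_new bot_right_new → Pre_combination_fn top_left_new top_right_new bot_left_new bot_right_new → Spec_combination_fn top_left_new top_right_new bot_left_new bot_right_new (combination_fn top_left_new top_right_new bot_left_new bot_right_new)

-- ===== LEMMAS AND PROOFS =====

-- entry (p,q) of the Option matrix, total
def getE (c : List (List (Option Int))) (p q : Nat) : Option Int := (c.getD p []).getD q none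

-- dimension invariant: 2n rows of length 2n
def Dims (c : List (List (Option Int))) (n : Nat) : Prop :=
  c.length = 2 * n ∧ ∀ r ∈ c, r.length = 2 * n

-- the intended value of cell (p,q) of the combined matrix
def val (top_left_new top_right_new bot_left_new bot_right_new : List (List Int)) (n p q : Nat) : Int :=
  if p < n then
    (if q < n then (top_left_new.getD p []).getD q 0 else (top_right_new.getD p []).getD (q - n) 0)
  else
    (if q < n then (bot_left_new.getD (p - n) []).getD q 0 else (bot_right_new.getD (p - n) []).getD (q - n) 0)

theorem writeCell_dims {c : List (List (Option Int))} {n : Nat} (h : Dims c n) (i j : Nat) (v : Int) :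
    Dims (writeCell c i j v) n := by
  obtain ⟨h1, h2⟩ := h
  by_cases hic : i < c.length
  · refine ⟨by simp [writeCell, h1], ?_⟩
    intro r hr
    rcases List.mem_or_eq_of_mem_set hr with h | h
    · exact h2 r h
    · subst h
      simp only [List.length_set]
      rw [List.getD_eq_getElem c [] hic]
      exact h2 _ (List.getElem_mem hic)
  · unfold writeCell
    rw [List.set_eq_of_length_le (by omega)]
    exact ⟨h1, h2⟩

theorem getD_set_ne {α : Type} (l : List α) (d : α) (i j : Nat) (a : α) (hij : i ≠ j) :
    (l.set i a).getD j d = l.getD j d := by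
  rw [List.getD_eq_getElem?_getD, List.getD_eq_getElem?_getD, List.getElem?_set_ne hij]

theorem getD_set_self {α : Type} (l : List α) (d : α) (i : Nat) (a : α) (hi : i < l.length) :
    (l.set i a).getD i d = a := by
  rw [List.getD_eq_getElem _ _ (by simpa using hi), List.getElem_set_self]

theorem getE_writeCell {c : List (List (Option Int))} {n : Nat} (h : Dims c n)
    {i j : Nat} (hi : i < 2 * n) (hj : j < 2 * n) (v : Int) (p q : Nat) :
    getE (writeCell c i j v) p q = if p = i ∧ q = j then some v else getE c p q := by
  obtain ⟨h1, h2⟩ := h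
  have hic : i < c.length := by omega
  have hrow : (c.getD i []).length = 2 * n := by
    rw [List.getD_eq_getElem c [] hic]; exact h2 _ (List.getElem_mem hic)
  unfold getE writeCell
  by_cases hp : p = i
  · subst hp
    rw [getD_set_self _ _ _ _ hic]
    by_cases hq : q = j
    · subst hq
      rw [getD_set_self _ _ _ _ (by omega)]
      simp
    · rw [getD_set_ne _ _ _ _ _ (fun h => hq h.symm)]
      simp [hq]
  · rw [getD_set_ne _ _ _ _ _ (fun h => hp h.symm)]
    simp [hp]

theorem inner_fold (tl tr bl br : List (List Int)) (n i : Nat) (hi : i < n) (m : Nat) (hm : m ≤ n)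
    (c : List (List (Option Int))) (hc : Dims c n) :
    Dims ((List.range m).foldl (innerStep tl tr bl br n i) c) n ∧
      ∀ p q, getE ((List.range m).foldl (innerStep tl tr bl br n i) c) p q =
        if (p = i ∨ p = i + n) ∧ (q < m ∨ (n ≤ q ∧ q < n + m)) then some (val tl tr bl br n p q)
        else getE c p q := by
  induction m with
  | zero =>
    refine ⟨hc, ?_⟩
    intro p q
    simp only [List.range_zero, List.foldl_nil]
    rw [if_neg (by omega)]
  | succ m ih =>
    obtain ⟨ihD, ihE⟩ := ih (by omega)
    rw [List.range_succ, List.foldl_append, List.foldl_cons, List.foldl_nil]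
    have D1 := writeCell_dims ihD i m ((tl.getD i []).getD m 0)
    have D2 := writeCell_dims D1 i (m + n) ((tr.getD i []).getD m 0)
    have D3 := writeCell_dims D2 (i + n) m ((bl.getD i []).getD m 0)
    have D4 := writeCell_dims D3 (i + n) (m + n) ((br.getD i []).getD m 0)
    refine ⟨D4, ?_⟩
    intro p q
    show getE (writeCell _ (i + n) (m + n) _) p q = _
    rw [getE_writeCell D3 (by omega) (by omega),
        getE_writeCell D2 (by omega) (by omega),
        getE_writeCell D1 (by omega) (by omega),
        getE_writeCell ihD (by omega) (by omega),
        ihE p q]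
    have hmn : m < n := by omega
    have e1 : i + n - n = i := by omega
    have e2 : m + n - n = m := by omega
    have hval_tl : val tl tr bl br n i m = (tl.getD i []).getD m 0 := by
      unfold val; rw [if_pos hi, if_pos hmn]
    have hval_tr : val tl tr bl br n i (m + n) = (tr.getD i []).getD m 0 := by
      unfold val; rw [if_pos hi, if_neg (by omega), e2]
    have hval_bl : val tl tr bl br n (i + n) m = (bl.getD i []).getD m 0 := by
      unfold val; rw [if_neg (by omega), if_pos hmn, e1]
    have hval_br : val tl tr bl br n (i + n) (m + n) = (br.getD i []).getD m 0 := by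
      unfold val; rw [if_neg (by omega), if_neg (by omega), e1, e2]
    by_cases h1 : p = i + n ∧ q = m + n
    · rw [if_pos h1, if_pos ⟨Or.inr h1.1, Or.inr ⟨by omega, by omega⟩⟩, h1.1, h1.2, hval_br]
    rw [if_neg h1]
    by_cases h2 : p = i + n ∧ q = m
    · rw [if_pos h2, if_pos ⟨Or.inr h2.1, Or.inl (by omega)⟩, h2.1, h2.2, hval_bl]
    rw [if_neg h2]
    by_cases h3 : p = i ∧ q = m + n
    · rw [if_pos h3, if_pos ⟨Or.inl h3.1, Or.inr ⟨by omega, by omega⟩⟩, h3.1, h3.2, hval_tr]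
    rw [if_neg h3]
    by_cases h4 : p = i ∧ q = m
    · rw [if_pos h4, if_pos ⟨Or.inl h4.1, Or.inl (by omega)⟩, h4.1, h4.2, hval_tl]
    rw [if_neg h4]
    split_ifs with ha hb <;> first | rfl | omega


theorem c0_dims (n : Nat) : Dims (empty_mat_creation (n * 2)) n := by
  refine ⟨by simp [empty_mat_creation]; omega, ?_⟩
  intro r hr
  rw [List.eq_of_mem_replicate hr]
  simp; omega

theorem replicate_getD_none (m q : Nat) :
    (List.replicate m (none : Option Int)).getD q none = none := by
  rw [List.getD_eq_getElem?_getD, List.getElem?_replicate]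
  split <;> rfl

theorem c0_getE (n p q : Nat) : getE (empty_mat_creation (n * 2)) p q = none := by
  unfold getE empty_mat_creation
  by_cases hp : p < n * 2
  · have h : (List.replicate (n * 2) (List.replicate (n * 2) (none : Option Int))).getD p []
        = List.replicate (n * 2) none := by
      rw [List.getD_eq_getElem _ _ (by simpa using hp)]
      exact List.getElem_replicate _
    rw [h, replicate_getD_none]
  · have h : (List.replicate (n * 2) (List.replicate (n * 2) (none : Option Int))).getD p []
        = [] := List.getD_eq_default _ _ (by simpa using hp)
    rw [h]
    rfl

theorem outer_fold (tl tr bl br : List (List Int)) (n : Nat) (k : Nat) (hk : k ≤ n) :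
    Dims ((List.range k).foldl (outerStep tl tr bl br n) (empty_mat_creation (n * 2))) n ∧
      ∀ p q, getE ((List.range k).foldl (outerStep tl tr bl br n) (empty_mat_creation (n * 2))) p q =
        if (p < k ∨ (n ≤ p ∧ p < n + k)) ∧ q < 2 * n then some (val tl tr bl br n p q) else none := by
  induction k with
  | zero =>
    refine ⟨c0_dims n, ?_⟩
    intro p q
    simp only [List.range_zero, List.foldl_nil]
    rw [if_neg (by omega), c0_getE]
  | succ k ih =>
    obtain ⟨ihD, ihE⟩ := ih (by omega)
    rw [List.range_succ, List.foldl_append, List.foldl_cons, List.foldl_nil]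
    obtain ⟨D', E'⟩ := inner_fold tl tr bl br n k (by omega) n (le_refl n) _ ihD
    refine ⟨D', ?_⟩
    intro p q
    rw [show outerStep tl tr bl br n _ k =
        (List.range n).foldl (innerStep tl tr bl br n k) _ from rfl, E' p q, ihE p q]
    split_ifs <;> first | rfl | omega

-- ===== VERDICT (by name: the statement is the Claim_ definition above) =====
theorem combination_fn_spec : Claim_equal_combination_fn := by
  intro tl tr bl br _ hPre
  obtain ⟨htr, hbl, hbr, rtl, rtr, rbl, rbr⟩ := hPre
  unfold Spec_combination_fn combination_fn combination_fn_alt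
  obtain ⟨⟨hMlen, hMrow⟩, hME⟩ :=
    outer_fold tl tr bl br tl.length tl.length (le_refl tl.length)
  set n := tl.length with hn
  set M := (List.range n).foldl (outerStep tl tr bl br n) (empty_mat_creation (n * 2)) with hM
  show M.map (fun row => row.map (fun x => x.getD 0)) = _
  have hrowM : ∀ {p : Nat} (h : p < M.length), (M[p]'h).length = 2 * n :=
    fun h => hMrow _ (List.getElem_mem h)
  have lenTL : ∀ {p : Nat}, p < n → n ≤ (tl.getD p []).length := by
    intro p hp
    rw [List.getD_eq_getElem _ _ (by omega : p < tl.length)]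
    exact rtl _ (List.getElem_mem _)
  have lenTake : ∀ (l : List (List Int)) {p : Nat}, p < n → n ≤ l.length →
      (∀ r ∈ l.take n, n ≤ r.length) → n ≤ (l.getD p []).length := by
    intro l p hp hl hr
    rw [List.getD_eq_getElem _ _ (by omega : p < l.length)]
    have hlt : p < (l.take n).length := by simp only [List.length_take]; omega
    have h2 := hr _ (List.getElem_mem hlt)
    rwa [List.getElem_take] at h2
  have lenTR : ∀ {p : Nat}, p < n → n ≤ (tr.getD p []).length :=
    fun hp => lenTake tr hp htr rtr
  have lenBL : ∀ {p : Nat}, p < n → n ≤ (bl.getD p []).length :=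
    fun hp => lenTake bl hp hbl rbl
  have lenBR : ∀ {p : Nat}, p < n → n ≤ (br.getD p []).length :=
    fun hp => lenTake br hp hbr rbr
  apply List.ext_getElem
  · simp only [List.length_map, List.length_append, List.length_range, hMlen]
    omega
  intro p h1 h2
  have hp2n : p < 2 * n := by simpa [hMlen] using h1
  rw [List.getElem_map]
  by_cases hp : p < n
  · rw [List.getElem_append_left (by simp only [List.length_map, List.length_range]; omega),
      List.getElem_map, List.getElem_range]
    apply List.ext_getElem
    · simp only [List.length_map, List.length_append, List.length_take, hrowM]
      have := lenTL hp; have := lenTR hp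
      omega
    intro q hq1 hq2
    have hq2n : q < 2 * n := by simpa [hrowM] using hq1
    rw [List.getElem_map]
    have hMpq : (M[p]'(by omega : p < M.length))[q]'(by rw [hrowM]; omega) = getE M p q := by
      unfold getE
      rw [List.getD_eq_getElem _ _ (by omega : p < M.length),
          List.getD_eq_getElem _ _ (by rw [hrowM]; omega)]
    rw [hMpq, hME p q, if_pos ⟨Or.inl hp, hq2n⟩]
    by_cases hq : q < n
    · rw [List.getElem_append_left
          (by simp only [List.length_take]; have := lenTL hp; omega),
        List.getElem_take]
      unfold val
      rw [if_pos hp, if_pos hq, Option.getD_some,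
          List.getD_eq_getElem _ _ (by have := lenTL hp; omega)]
    · rw [List.getElem_append_right
          (by simp only [List.length_take]; have := lenTL hp; omega)]
      simp only [List.length_take, Nat.min_eq_left (lenTL hp)]
      rw [List.getElem_take]
      unfold val
      rw [if_pos hp, if_neg hq, Option.getD_some,
          List.getD_eq_getElem _ _ (by have := lenTR hp; omega)]
  · rw [List.getElem_append_right
        (by simp only [List.length_map, List.length_range]; omega),
      List.getElem_map]
    simp only [List.length_map, List.length_range]
    rw [List.getElem_range]
    have hpn : p - n < n := by omega
    apply List.ext_getElem
    · simp only [List.length_map, List.length_append, List.length_take, hrowM]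
      have := lenBL hpn; have := lenBR hpn
      omega
    intro q hq1 hq2
    have hq2n : q < 2 * n := by simpa [hrowM] using hq1
    rw [List.getElem_map]
    have hMpq : (M[p]'(by omega : p < M.length))[q]'(by rw [hrowM]; omega) = getE M p q := by
      unfold getE
      rw [List.getD_eq_getElem _ _ (by omega : p < M.length),
          List.getD_eq_getElem _ _ (by rw [hrowM]; omega)]
    rw [hMpq, hME p q, if_pos ⟨Or.inr ⟨by omega, by omega⟩, hq2n⟩]
    by_cases hq : q < n
    · rw [List.getElem_append_left
          (by simp only [List.length_take]; have := lenBL hpn; omega),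
        List.getElem_take]
      unfold val
      rw [if_neg hp, if_pos hq, Option.getD_some,
          List.getD_eq_getElem _ _ (by have := lenBL hpn; omega)]
    · rw [List.getElem_append_right
          (by simp only [List.length_take]; have := lenBL hpn; omega)]
      simp only [List.length_take, Nat.min_eq_left (lenBL hpn)]
      rw [List.getElem_take]
      unfold val
      rw [if_neg hp, if_neg hq, Option.getD_some,
          List.getD_eq_getElem _ _ (by have := lenBR hpn; omega)]
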